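-- pv_equiv track=rewrite | github.com/zmentd/codesight | src/lex/syntax_validator.py | _check_string_literals
-- ===== SOURCE A (Python) =====
-- from typing import Any, Dict, List, Optional
--
-- def _check_string_literals(content: str) -> Dict[str, Any]:
--     """Check string literal syntax."""
--     issues: List[str] = []
--     warnings: List[str] = []
--
--     # Check for unterminated strings
--     lines = content.split('\n')
--     for i, line in enumerate(lines, 1):
--         # Simple check for unterminated strings
--         in_string = False
--         escape_next = False
--
--         for char in line:
--             if escape_next:
--                 escape_next = False
--                 continue
--
--             if char == '\\':
--                 escape_next = True
--             elif char == '"':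
--                 in_string = not in_string
--
--         if in_string:
--             warnings.append(f"Possible unterminated string at line {i}")
--
--     return {'issues': issues, 'warnings': warnings}
-- ===== SOURCE B (Python) =====
-- from typing import Any, Dict, List
--
-- def _check_string_literals(content: str) -> Dict[str, Any]:
--     """Check string literal syntax."""
--     warnings = [
--         f"Possible unterminated string at line {i}"
--         for i, line in enumerate(content.split('\n'), 1)
--         if line.replace('\\\\', '').replace('\\"', '').count('"') % 2 == 1
--     ]
--     return {'issues': [], 'warnings': warnings}
-- ===== Notes on version B (the rewrite author's own statement) =====
-- stated objective: simpler
-- what changed: Replaced A's per-character in_string/escape_next state machine with a normalize-then-count decomposition: per line, strip escaped backslash pairs and escaped quotes with two str.replace calls, then flag the line when the remaining double-quote count is odd.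
import Mathlib
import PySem

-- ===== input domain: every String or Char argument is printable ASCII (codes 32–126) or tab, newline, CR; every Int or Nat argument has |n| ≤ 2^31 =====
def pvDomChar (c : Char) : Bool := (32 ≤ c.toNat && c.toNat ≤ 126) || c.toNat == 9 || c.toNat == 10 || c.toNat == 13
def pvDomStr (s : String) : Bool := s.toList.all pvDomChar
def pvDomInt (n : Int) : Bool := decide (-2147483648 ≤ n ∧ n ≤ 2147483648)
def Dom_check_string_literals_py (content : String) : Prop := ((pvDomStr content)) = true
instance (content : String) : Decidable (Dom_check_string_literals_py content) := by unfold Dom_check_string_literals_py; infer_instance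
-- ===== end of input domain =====

-- B replaces A's per-character in_string/escape_next state machine by a normalize-then-count
-- decomposition (strip '\\\\' pairs, strip '\\"', then test quote-count parity); objective: simpler.

-- ===== PORT A =====
-- the inner `for char in line` loop's state: (in_string, escape_next)
def pvStepA (s : Bool × Bool) (c : Char) : Bool × Bool :=
  if s.2 then (s.1, false)
  else if c = '\\' then (s.1, true)
  else if c = '"' then (!s.1, false)
  else (s.1, false)

def pvLineA (l : List Char) : Bool := (l.foldl pvStepA (false, false)).1

def check_string_literals_py (content : String) : List (String × List String) :=
  let issues : List String := []
  let lines := PySem.Chars.splitOn content.toList ['\n']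
  let warnings := (PySem.List.enumerate lines 1).foldl
    (fun ws p =>
      if pvLineA p.2 then ws ++ ["Possible unterminated string at line " ++ PySem.Int.toStr p.1]
      else ws) []
  [("issues", issues), ("warnings", warnings)]

-- ===== PORT B =====
def pvLineB (l : List Char) : Bool :=
  PySem.Chars.count (PySem.Chars.replace (PySem.Chars.replace l ['\\', '\\'] []) ['\\', '"'] []) ['"'] % 2 == 1

def check_string_literals_py_alt (content : String) : List (String × List String) :=
  let warnings :=
    ((PySem.List.enumerate (PySem.Chars.splitOn content.toList ['\n']) 1).filter
        (fun p => pvLineB p.2)).map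
      (fun p => "Possible unterminated string at line " ++ PySem.Int.toStr p.1)
  [("issues", []), ("warnings", warnings)]

-- ===== PRECONDITION & SPEC =====
def Spec_check_string_literals_py (content : String) (out : List (String × List String)) : Prop := out = check_string_literals_py_alt content
instance (content : String) (out : List (String × List String)) : Decidable (Spec_check_string_literals_py content out) := by unfold Spec_check_string_literals_py; infer_instance

-- ===== CLAIM (what is proved, stated in full; the proofs are below) =====
def Claim_equal_check_string_literals_py : Prop := ∀ (content : String), Dom_check_string_literals_py content → Spec_check_string_literals_py content (check_string_literals_py content)

-- ===== LEMMAS AND PROOFS =====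

-- unescaped-quote count of a line, as A's state machine sees it
def pvCnt : List Char → Nat
  | [] => 0
  | ['\\'] => 0
  | '\\' :: _ :: t => pvCnt t
  | '"' :: t => 1 + pvCnt t
  | _ :: t => pvCnt t

-- structural form of `replace l [a,b] []`
def pvRep (a b : Char) : List Char → List Char
  | [] => []
  | [c] => [c]
  | c :: d :: t => if c = a ∧ d = b then pvRep a b t else c :: pvRep a b (d :: t)

theorem pvRep_cons_ne {a b c : Char} (h : c ≠ a) (t : List Char) :
    pvRep a b (c :: t) = c :: pvRep a b t := by
  cases t <;> simp [pvRep, h]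

theorem pvRep_go_nil (a b : Char) (fuel : Nat) (acc : List Char) :
    PySem.Chars.replace.go [a, b] [] fuel [] acc = acc.reverse := by
  cases fuel <;> simp [PySem.Chars.replace.go]

theorem pvRep_go (a b : Char) :
    ∀ (fuel : Nat) (l acc : List Char), l.length ≤ fuel →
      PySem.Chars.replace.go [a, b] [] fuel l acc = acc.reverse ++ pvRep a b l := by
  intro fuel
  induction fuel with
  | zero =>
    intro l acc h
    have : l = [] := List.length_eq_zero_iff.mp (Nat.le_zero.mp h)
    subst this
    simp [pvRep_go_nil, pvRep]
  | succ n ih =>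
    intro l acc h
    match l with
    | [] => simp [pvRep_go_nil, pvRep]
    | [c] =>
      have hpre : [a, b].isPrefixOf [c] = false := by
        simp [List.isPrefixOf]
      rw [PySem.Chars.replace.go, hpre]
      simp only [Bool.false_eq_true, if_false]
      rw [pvRep_go_nil]
      simp [pvRep]
    | c :: d :: t =>
      simp only [List.length_cons] at h
      by_cases hc : c = a ∧ d = b
      · have hpre : [a, b].isPrefixOf (c :: d :: t) = true := by
          simp [List.isPrefixOf, hc.1, hc.2]
        rw [PySem.Chars.replace.go, hpre]
        simp only [if_true, List.length_cons, List.length_nil, List.drop_succ_cons,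
          List.drop_zero, List.reverse_nil, List.nil_append]
        rw [ih t acc (by omega)]
        simp [pvRep, hc.1, hc.2]
      · rw [PySem.Chars.replace.go]
        have hpre : [a, b].isPrefixOf (c :: d :: t) = false := by
          cases h1 : a == c <;> cases h2 : b == d <;> simp_all [List.isPrefixOf]
        rw [hpre]
        simp only [Bool.false_eq_true, if_false]
        rw [ih (d :: t) (c :: acc) (by simp; omega)]
        simp [pvRep, hc]

theorem pvReplace_eq (a b : Char) (l : List Char) :
    PySem.Chars.replace l [a, b] [] = pvRep a b l := by
  rw [PySem.Chars.replace]
  simp only [List.isEmpty_cons, Bool.false_eq_true, if_false]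
  simpa using pvRep_go a b l.length l [] le_rfl

theorem pvCount_go_nil (fuel : Nat) (acc : Nat) :
    PySem.Chars.count.go ['"'] fuel [] acc = acc := by
  cases fuel <;> simp [PySem.Chars.count.go]

theorem pvCount_go (fuel : Nat) :
    ∀ (l : List Char) (acc : Nat), l.length ≤ fuel →
      PySem.Chars.count.go ['"'] fuel l acc = acc + l.count '"' := by
  induction fuel with
  | zero =>
    intro l acc h
    have : l = [] := List.length_eq_zero_iff.mp (Nat.le_zero.mp h)
    subst this
    simp [pvCount_go_nil]
  | succ n ih =>
    intro l acc h
    match l with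
    | [] => simp [pvCount_go_nil]
    | c :: t =>
      simp only [List.length_cons] at h
      by_cases hc : c = '"'
      · subst hc
        have hpre : ['"'].isPrefixOf ('"' :: t) = true := by
          simp [List.isPrefixOf]
        rw [PySem.Chars.count.go, hpre]
        simp only [if_true, List.length_cons, List.length_nil, List.drop_succ_cons, List.drop_zero]
        rw [ih t (acc + 1) (by omega)]
        simp
        omega
      · have hpre : ['"'].isPrefixOf (c :: t) = false := by
          simp [List.isPrefixOf, Ne.symm hc]
        rw [PySem.Chars.count.go, hpre]
        simp only [Bool.false_eq_true, if_false]
        rw [ih t acc (by omega)]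
        simp [hc]

theorem pvCount_eq (l : List Char) : PySem.Chars.count l ['"'] = l.count '"' := by
  rw [PySem.Chars.count]
  simp only [List.isEmpty_cons, Bool.false_eq_true, if_false]
  simpa using pvCount_go l.length l 0 le_rfl

-- the cleaned line has exactly the unescaped quotes
theorem pvClean_count (l : List Char) :
    (pvRep '\\' '"' (pvRep '\\' '\\' l)).count '"' = pvCnt l := by
  induction l using pvCnt.induct with
  | case1 => simp [pvRep, pvCnt]
  | case2 => simp [pvRep, pvCnt]
  | case3 c t ih =>
    by_cases hc : c = '\\'
    · subst hc
      simp only [pvRep, and_self, if_true]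
      simpa [pvCnt] using ih
    · have h1 : pvRep '\\' '\\' ('\\' :: c :: t) = '\\' :: c :: pvRep '\\' '\\' t := by
        simp [pvRep, hc, pvRep_cons_ne hc]
      rw [h1]
      by_cases hq : c = '"'
      · subst hq
        simp only [pvRep, and_self, if_true]
        simpa [pvCnt] using ih
      · have h2 : pvRep '\\' '"' ('\\' :: c :: pvRep '\\' '\\' t)
            = '\\' :: c :: pvRep '\\' '"' (pvRep '\\' '\\' t) := by
          have : pvRep '\\' '"' ('\\' :: c :: pvRep '\\' '\\' t)
              = '\\' :: pvRep '\\' '"' (c :: pvRep '\\' '\\' t) := by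
            cases t' : pvRep '\\' '\\' t <;> simp [pvRep, hq]
          rw [this, pvRep_cons_ne hc]
        rw [h2]
        simp only [List.count_cons]
        simp only [pvCnt]
        rw [ih]
        have : ('"' : Char) ≠ '\\' := by decide
        simp [hq, beq_iff_eq]
  | case4 t ih =>
    have hq : ('"' : Char) ≠ '\\' := by decide
    rw [pvRep_cons_ne hq, pvRep_cons_ne hq]
    simp only [List.count_cons, pvCnt]
    rw [ih]
    simp
    omega
  | case5 c t hne1 hne2 hne3 ih =>
    have hc : c ≠ '\\' := by
      intro h
      cases t with
      | nil => exact hne1 h rfl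
      | cons d t' => exact hne2 d t' h rfl
    have hq : c ≠ '"' := hne3
    rw [pvRep_cons_ne hc, pvRep_cons_ne hc]
    simp only [List.count_cons, pvCnt]
    rw [ih]
    simp [hq]

-- A's state machine computes the parity of pvCnt
theorem pvMachine (l : List Char) :
    ∀ (ins : Bool), (l.foldl pvStepA (ins, false)).1 = (ins != decide (pvCnt l % 2 = 1)) := by
  induction l using pvCnt.induct with
  | case1 => intro ins; simp [pvCnt]
  | case2 => intro ins; simp [pvCnt, pvStepA]
  | case3 c t ih =>
    intro ins
    have : pvStepA (pvStepA (ins, false) '\\') c = (ins, false) := by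
      simp [pvStepA]
    simp only [List.foldl_cons, this]
    simpa [pvCnt] using ih ins
  | case4 t ih =>
    intro ins
    have : pvStepA (ins, false) '"' = (!ins, false) := by
      simp [pvStepA]
    simp only [List.foldl_cons, this, pvCnt]
    rw [ih (!ins)]
    rcases Nat.mod_two_eq_zero_or_one (pvCnt t) with h | h <;>
      · simp [Nat.add_mod, h]
  | case5 c t hne1 hne2 hne3 ih =>
    intro ins
    have hc : c ≠ '\\' := by
      intro h
      cases t with
      | nil => exact hne1 h rfl
      | cons d t' => exact hne2 d t' h rfl
    have hq : c ≠ '"' := hne3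
    have : pvStepA (ins, false) c = (ins, false) := by
      simp [pvStepA, hc, hq]
    simp only [List.foldl_cons, this]
    simpa [pvCnt, hc, hq] using ih ins

theorem pvLine_eq (l : List Char) : pvLineA l = pvLineB l := by
  unfold pvLineA pvLineB
  rw [pvMachine l false, pvReplace_eq, pvReplace_eq, pvCount_eq, pvClean_count]
  rcases Nat.mod_two_eq_zero_or_one (pvCnt l) with h | h <;> simp [h]

-- ===== VERDICT (by name: the statement is the Claim_ definition above) =====
theorem check_string_literals_py_spec : Claim_equal_check_string_literals_py := by
  intro content _
  unfold Spec_check_string_literals_py check_string_literals_py check_string_literals_py_alt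
  simp only [PySem.List.foldl_append_if]
  have : (fun (p : Int × List Char) => pvLineA p.2) = (fun p => pvLineB p.2) :=
    funext fun p => pvLine_eq p.2
  rw [this]
  simp
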